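-- pv_equiv track=rewrite | github.com/yangwei-lim/Device_Generator | Pattern.py | simple_1d_common_centroid_pattern
-- ===== SOURCE A (Python) =====
-- def simple_1d_common_centroid_pattern(inst: list) -> list:
--     """
--     @brief: simple 1D common centroid pattern
--     @param: inst -> instance list (e.g. [1, 2, 3]: one 0, two 1, three 2)
--     @return: pattern -> pattern list (e.g. [1, 2, 0, 2, 2, 1])
--     """
--     pattern = []
--     left_pattern = []
--     right_pattern = []
--
--     # convert the instances number to a dictionary
--     counts = dict(enumerate(inst))
--     odd_counts = {}
--
--     # get the odd number instance
--     for i in counts: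
--         if counts[i] % 2 != 0:
--             # Method 1:
--             # odd_counts[i] = counts[i]   # get the odd instances from the counts
--             # counts[i] = 0               # remove all the odd instances from the counts
--
--             # Method 2:
--             odd_counts[i] = 1           # get one count for the odd instances
--             counts[i] -= 1              # minus one from the counts
--
--     # create the left and right pattern based on the even instances
--     post = "left"
--     for i in counts:
--         for _ in range(counts[i]):
--             if post == "left":
--                 left_pattern.append(i)
--                 post = "right"
--             else:
--                 right_pattern.append(i)
--                 post = "left"
--
--     # add the odd instances to the left and right pattern
--     post = "left"
--     for i in odd_counts:
--         for _ in range(odd_counts[i]):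
--             if post == "left":
--                 left_pattern.append(i)
--                 post = "right"
--             else:
--                 right_pattern.append(i)
--                 post = "left"
--
--     # create the pattern by combining the left and right (reversed) pattern
--     pattern = left_pattern + right_pattern[::-1]
--
--     return pattern
-- ===== SOURCE B (Python) =====
-- def simple_1d_common_centroid_pattern(inst: list) -> list:
--     """
--     @brief: simple 1D common centroid pattern
--     @param: inst -> instance list (e.g. [1, 2, 3]: one 0, two 1, three 2)
--     @return: pattern -> pattern list (e.g. [1, 2, 0, 2, 2, 1])
--     """
--     # Every index's even share (count, minus one if odd) splits equally between
--     # the two halves, so a single 'half' list serves as both the even part of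
--     # the left pattern and the even part of the right pattern; only the odd
--     # singletons alternate, by parity of their position among the odd indices.
--     half = []
--     odds = []
--     for i, c in enumerate(inst):
--         half += [i] * ((c - 1 if c % 2 != 0 else c) // 2)
--         if c % 2 != 0:
--             odds.append(i)
--     left = list(half)
--     right = list(half)
--     for k, i in enumerate(odds):
--         (left if k % 2 == 0 else right).append(i)
--     return left + right[::-1]
-- ===== Notes on version B (the rewrite author's own statement) =====
-- stated objective: simpler
-- what changed: Drops A's dict(enumerate) bookkeeping and the two 'post' toggle state machines: since every adjusted even count splits equally, B emits each index's halved even share once into a single shared 'half' list used as both halves, and only parity-splits the odd-count indices.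
import Mathlib
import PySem

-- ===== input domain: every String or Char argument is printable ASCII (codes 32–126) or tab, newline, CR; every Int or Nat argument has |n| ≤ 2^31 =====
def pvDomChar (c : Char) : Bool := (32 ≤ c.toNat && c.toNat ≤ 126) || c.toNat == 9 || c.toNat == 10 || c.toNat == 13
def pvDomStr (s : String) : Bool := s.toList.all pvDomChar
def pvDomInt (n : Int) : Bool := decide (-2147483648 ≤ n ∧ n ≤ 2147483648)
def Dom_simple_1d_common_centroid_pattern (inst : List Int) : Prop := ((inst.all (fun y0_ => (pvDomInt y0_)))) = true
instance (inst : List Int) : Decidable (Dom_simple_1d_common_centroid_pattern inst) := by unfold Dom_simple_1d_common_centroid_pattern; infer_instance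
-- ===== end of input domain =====

-- B replaces A's dict bookkeeping and toggle state machines by one pass emitting each
-- index's halved even share into a single shared 'half' list plus a parity split of the
-- odd indices (objective: simpler).

-- ===== PORT A =====
def simple_1d_common_centroid_pattern (inst : List Int) : List Int :=
  -- counts = dict(enumerate(inst))
  let counts : PySem.Dict Int Int :=
    (PySem.List.enumerate inst 0).foldl (fun d p => d.insert p.1 p.2) PySem.Dict.empty
  -- for i in counts: if counts[i] % 2 != 0: odd_counts[i] = 1; counts[i] -= 1
  -- (counts[i] is read with getD: every key iterated comes from counts itself, so it is present)
  let co :=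
    counts.keys.foldl
      (fun (co : PySem.Dict Int Int × PySem.Dict Int Int) i =>
        if PySem.Int.mod (co.1.getD i 0) 2 != 0 then
          (co.1.modify i 0 (· - 1), co.2.insert i 1)
        else co)
      (counts, PySem.Dict.empty)
  let counts2 := co.1
  let odd_counts := co.2
  -- even loop: post toggles between "left" and "right"
  let lrp :=
    counts2.keys.foldl
      (fun s i =>
        (PySem.List.pyRange 0 (counts2.getD i 0) 1).foldl
          (fun (s : List Int × List Int × String) (_ : Int) =>
            if s.2.2 == "left" then (s.1 ++ [i], s.2.1, "right")
            else (s.1, s.2.1 ++ [i], "left"))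
          s)
      (([] : List Int), ([] : List Int), ("left" : String))
  -- odd loop: post restarts at "left"
  let lrp2 :=
    odd_counts.keys.foldl
      (fun s i =>
        (PySem.List.pyRange 0 (odd_counts.getD i 0) 1).foldl
          (fun (s : List Int × List Int × String) (_ : Int) =>
            if s.2.2 == "left" then (s.1 ++ [i], s.2.1, "right")
            else (s.1, s.2.1 ++ [i], "left"))
          s)
      (lrp.1, lrp.2.1, ("left" : String))
  -- left_pattern + right_pattern[::-1]
  lrp2.1 ++ lrp2.2.1.reverse

-- ===== PORT B =====
def simple_1d_common_centroid_pattern_alt (inst : List Int) : List Int :=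
  -- one pass: half += [i] * ((c - 1 if c % 2 != 0 else c) // 2); odds collects odd-count indices
  let ho :=
    (PySem.List.enumerate inst 0).foldl
      (fun (p : List Int × List Int) ic =>
        (p.1 ++ PySem.List.pyRepeat [ic.1]
            (PySem.Int.floordiv (if PySem.Int.mod ic.2 2 != 0 then ic.2 - 1 else ic.2) 2),
         if PySem.Int.mod ic.2 2 != 0 then p.2 ++ [ic.1] else p.2))
      (([] : List Int), ([] : List Int))
  -- left/right start as copies of half; odd indices alternate by position parity
  let lr :=
    (PySem.List.enumerate ho.2 0).foldl
      (fun (p : List Int × List Int) ki =>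
        if PySem.Int.mod ki.1 2 == 0 then (p.1 ++ [ki.2], p.2) else (p.1, p.2 ++ [ki.2]))
      (ho.1, ho.1)
  -- left + right[::-1]
  lr.1 ++ lr.2.reverse

-- ===== PRECONDITION & SPEC =====
def Spec_simple_1d_common_centroid_pattern (inst : List Int) (out : List Int) : Prop := out = simple_1d_common_centroid_pattern_alt inst
instance (inst : List Int) (out : List Int) : Decidable (Spec_simple_1d_common_centroid_pattern inst out) := by unfold Spec_simple_1d_common_centroid_pattern; infer_instance

-- ===== CLAIM (what is proved, stated in full; the proofs are below) =====
def Claim_equal_simple_1d_common_centroid_pattern : Prop := ∀ (inst : List Int), Dom_simple_1d_common_centroid_pattern inst → Spec_simple_1d_common_centroid_pattern inst (simple_1d_common_centroid_pattern inst)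

-- ===== LEMMAS AND PROOFS =====

-- split a list into its even-position and odd-position elements
def splitAlt : List Int → List Int × List Int
  | [] => ([], [])
  | x :: xs => (x :: (splitAlt xs).2, (splitAlt xs).1)

-- 2*t toggle steps all appending i from phase "left" put t copies of i on each side and end at "left"
lemma tog_two (i : Int) : ∀ (t : Nat) (l r : List Int),
    (fun s : List Int × List Int × String =>
        if s.2.2 == "left" then (s.1 ++ [i], s.2.1, "right") else (s.1, s.2.1 ++ [i], "left"))^[2*t]
      (l, r, "left")
    = (l ++ List.replicate t i, r ++ List.replicate t i, "left") := by
  intro t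
  induction t with
  | zero => intro l r; simp
  | succ t ih =>
    intro l r
    have h2 : 2 * (t + 1) = 2 * t + 2 := by ring
    rw [h2, Function.iterate_add_apply]
    have hstep :
        (fun s : List Int × List Int × String =>
            if s.2.2 == "left" then (s.1 ++ [i], s.2.1, "right") else (s.1, s.2.1 ++ [i], "left"))^[2]
          (l, r, "left")
        = (l ++ [i], r ++ [i], "left") := by
      simp [Function.iterate_succ_apply, -Function.iterate_succ]
    rw [hstep, ih]
    simp [List.replicate_succ, List.append_assoc]

-- a block of even length splits equally and returns the phase to "left"
lemma tog_block (i m : Int) (hm : (2:Int) ∣ m) (l r : List Int) :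
    (PySem.List.pyRange 0 m 1).foldl
      (fun (s : List Int × List Int × String) (_ : Int) =>
        if s.2.2 == "left" then (s.1 ++ [i], s.2.1, "right") else (s.1, s.2.1 ++ [i], "left"))
      (l, r, "left")
    = (l ++ List.replicate (PySem.Int.floordiv m 2).toNat i,
       r ++ List.replicate (PySem.Int.floordiv m 2).toNat i, "left") := by
  by_cases hm0 : m ≤ 0
  · rw [PySem.List.pyRange_one_eq_nil (by omega)]
    rw [PySem.Int.floordiv_eq_ediv_of_pos (by norm_num)]
    have : (m / 2 : Int).toNat = 0 := by omega
    simp [this]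
  · obtain ⟨k, hk⟩ := hm
    rw [List.foldl_const, PySem.List.length_pyRange_one,
      PySem.Int.floordiv_eq_ediv_of_pos (by norm_num)]
    have hk' : (m - 0).toNat = 2 * (m / 2 : Int).toNat := by omega
    rw [hk', tog_two]

-- the even loop: all counts even, so both sides receive the same halved flat list
lemma evenloop (f : Int → Int) : ∀ (ks : List Int), (∀ i ∈ ks, (2:Int) ∣ f i) → ∀ (l r : List Int),
    ks.foldl
      (fun s i =>
        (PySem.List.pyRange 0 (f i) 1).foldl
          (fun (s : List Int × List Int × String) (_ : Int) =>
            if s.2.2 == "left" then (s.1 ++ [i], s.2.1, "right") else (s.1, s.2.1 ++ [i], "left"))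
          s)
      (l, r, "left")
    = (l ++ ks.flatMap (fun i => List.replicate (PySem.Int.floordiv (f i) 2).toNat i),
       r ++ ks.flatMap (fun i => List.replicate (PySem.Int.floordiv (f i) 2).toNat i), "left") := by
  intro ks
  induction ks with
  | nil => intro _ l r; simp
  | cons k ks ih =>
    intro hf l r
    rw [List.foldl_cons, tog_block k (f k) (hf k (by simp)),
      ih (fun i hi => hf i (by simp [hi]))]
    simp [List.append_assoc]

-- a nested loop whose inner range always has length 1 is a plain toggle fold
lemma oneloop (f : Int → Int) : ∀ (ks : List Int), (∀ i ∈ ks, f i = 1) →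
    ∀ (s : List Int × List Int × String),
    ks.foldl
      (fun s i =>
        (PySem.List.pyRange 0 (f i) 1).foldl
          (fun (s : List Int × List Int × String) (_ : Int) =>
            if s.2.2 == "left" then (s.1 ++ [i], s.2.1, "right") else (s.1, s.2.1 ++ [i], "left"))
          s)
      s
    = ks.foldl
        (fun (s : List Int × List Int × String) i =>
          if s.2.2 == "left" then (s.1 ++ [i], s.2.1, "right") else (s.1, s.2.1 ++ [i], "left"))
        s := by
  intro ks
  induction ks with
  | nil => intro _ _; simp
  | cons k ks ih =>
    intro hf s
    have h1 : PySem.List.pyRange 0 (f k) 1 = [0] := by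
      rw [hf k (by simp)]; decide
    rw [List.foldl_cons, List.foldl_cons, h1, List.foldl_cons, List.foldl_nil,
      ih (fun i hi => hf i (by simp [hi]))]

-- a toggle fold distributes a list by alternation: splitAlt
lemma togfold : ∀ (xs : List Int) (l r : List Int) (post : String),
    (((xs.foldl
        (fun (s : List Int × List Int × String) i =>
          if s.2.2 == "left" then (s.1 ++ [i], s.2.1, "right") else (s.1, s.2.1 ++ [i], "left"))
        (l, r, post)).1),
     ((xs.foldl
        (fun (s : List Int × List Int × String) i =>
          if s.2.2 == "left" then (s.1 ++ [i], s.2.1, "right") else (s.1, s.2.1 ++ [i], "left"))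
        (l, r, post)).2.1))
    = if post == "left" then (l ++ (splitAlt xs).1, r ++ (splitAlt xs).2)
      else (l ++ (splitAlt xs).2, r ++ (splitAlt xs).1) := by
  intro xs
  induction xs with
  | nil => intro l r post; cases h : (post == "left") <;> simp [splitAlt]
  | cons x xs ih =>
    intro l r post
    rw [List.foldl_cons]
    cases h : (post == "left")
    · simp only [Bool.false_eq_true, if_false]
      rw [ih]; simp [splitAlt, List.append_assoc]
    · simp only [if_true]
      rw [ih]; simp [splitAlt, List.append_assoc]

-- the odd-fixing loop of A, characterised pointwise
lemma oddfix : ∀ (ks : List Int) (c o : PySem.Dict Int Int), ks.Nodup →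
    (∀ i ∈ ks, o.contains i = false) → (∀ i ∈ ks, c.contains i = true) →
    (∀ j, ((ks.foldl
        (fun (co : PySem.Dict Int Int × PySem.Dict Int Int) i =>
          if PySem.Int.mod (co.1.getD i 0) 2 != 0 then
            (co.1.modify i 0 (· - 1), co.2.insert i 1)
          else co)
        (c, o)).1).getD j 0
      = if j ∈ ks ∧ PySem.Int.mod (c.getD j 0) 2 ≠ 0 then c.getD j 0 - 1 else c.getD j 0)
    ∧ ((ks.foldl
        (fun (co : PySem.Dict Int Int × PySem.Dict Int Int) i =>
          if PySem.Int.mod (co.1.getD i 0) 2 != 0 then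
            (co.1.modify i 0 (· - 1), co.2.insert i 1)
          else co)
        (c, o)).1).keys = c.keys
    ∧ ((ks.foldl
        (fun (co : PySem.Dict Int Int × PySem.Dict Int Int) i =>
          if PySem.Int.mod (co.1.getD i 0) 2 != 0 then
            (co.1.modify i 0 (· - 1), co.2.insert i 1)
          else co)
        (c, o)).2).items
      = o.items ++ (ks.filter (fun i => PySem.Int.mod (c.getD i 0) 2 != 0)).map (fun i => (i, (1:Int))) := by
  intro ks
  induction ks with
  | nil =>
    intro c o _ _ _
    refine ⟨fun j => by simp, rfl, by simp⟩
  | cons k ks ih =>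
    intro c o hnd ho hc
    obtain ⟨hknotin, hnd'⟩ := List.nodup_cons.mp hnd
    rw [List.foldl_cons]
    by_cases hP : PySem.Int.mod (c.getD k 0) 2 ≠ 0
    · have hPb : (PySem.Int.mod (c.getD k 0) 2 != 0) = true := bne_iff_ne.mpr hP
      simp only [hPb, if_true]
      have ho1 : ∀ i ∈ ks, ((o.insert k 1).contains i) = false := by
        intro i hi
        rw [PySem.Dict.contains_insert]
        have hik : i ≠ k := fun h => hknotin (h ▸ hi)
        simp [hik, ho i (List.mem_cons_of_mem _ hi)]
      have hc1 : ∀ i ∈ ks, ((c.modify k 0 (· - 1)).contains i) = true := by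
        intro i hi
        rw [PySem.Dict.contains_modify]
        simp [hc i (List.mem_cons_of_mem _ hi)]
      obtain ⟨ih1, ih2, ih3⟩ := ih (c.modify k 0 (· - 1)) (o.insert k 1) hnd' ho1 hc1
      have hgd : ∀ j', (c.modify k 0 (· - 1)).getD j' 0
          = if j' = k then c.getD k 0 - 1 else c.getD j' 0 := by
        intro j'; exact PySem.Dict.getD_modify c k j' 0 _
      refine ⟨fun j => ?_, ?_, ?_⟩
      · rw [ih1 j, hgd j]
        by_cases hjk : j = k
        · subst hjk
          simp only [if_true]
          rw [if_neg (fun h => hknotin h.1), if_pos ⟨List.mem_cons_self, hP⟩]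
        · simp only [hjk, if_false]
          simp [hjk]
      · rw [ih2, PySem.Dict.keys_modify,
          PySem.Dict.keys_insert_of_contains _ _ (hc k (List.mem_cons_self))]
      · rw [ih3, PySem.Dict.items_insert_of_not_contains _ _ (ho k (List.mem_cons_self))]
        have hfc : ks.filter (fun i => PySem.Int.mod ((c.modify k 0 (· - 1)).getD i 0) 2 != 0)
            = ks.filter (fun i => PySem.Int.mod (c.getD i 0) 2 != 0) := by
          apply List.filter_congr
          intro i hi
          have hik : i ≠ k := fun h => hknotin (h ▸ hi)
          rw [hgd i]
          simp [hik]
        rw [hfc, List.filter_cons, if_pos hPb]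
        simp [List.append_assoc]
    · have hP0 : PySem.Int.mod (c.getD k 0) 2 = 0 := not_ne_iff.mp hP
      have hPb : (PySem.Int.mod (c.getD k 0) 2 != 0) = false := by rw [hP0]; decide
      simp only [hPb, Bool.false_eq_true, if_false]
      obtain ⟨ih1, ih2, ih3⟩ := ih c o hnd'
        (fun i hi => ho i (List.mem_cons_of_mem _ hi))
        (fun i hi => hc i (List.mem_cons_of_mem _ hi))
      refine ⟨fun j => ?_, ih2, ?_⟩
      · rw [ih1 j]
        by_cases hjk : j = k
        · subst hjk
          rw [if_neg (fun h => hknotin h.1), if_neg (fun h => hP h.2)]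
        · simp [hjk]
      · rw [ih3, List.filter_cons, if_neg (by rw [hPb]; decide)]

-- B's parity fold over enumerate is splitAlt (phase given by the start index's parity)
lemma oddsplitB : ∀ (xs : List Int) (s : Int) (a b : List Int),
    (PySem.List.enumerate xs s).foldl
      (fun (p : List Int × List Int) ki =>
        if PySem.Int.mod ki.1 2 == 0 then (p.1 ++ [ki.2], p.2) else (p.1, p.2 ++ [ki.2]))
      (a, b)
    = if PySem.Int.mod s 2 == 0 then (a ++ (splitAlt xs).1, b ++ (splitAlt xs).2)
      else (a ++ (splitAlt xs).2, b ++ (splitAlt xs).1) := by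
  intro xs
  induction xs with
  | nil =>
    intro s a b
    cases h : (PySem.Int.mod s 2 == 0) <;> simp [PySem.List.enumerate_nil, splitAlt]
  | cons x xs ih =>
    intro s a b
    rw [PySem.List.enumerate_cons, List.foldl_cons]
    have h2 : (0:Int) < 2 := by norm_num
    rcases Int.emod_two_eq s with h | h
    · have hs : PySem.Int.mod s 2 = 0 := by rw [PySem.Int.mod_eq_emod_of_pos h2]; exact h
      have hs1 : PySem.Int.mod (s+1) 2 = 1 := by rw [PySem.Int.mod_eq_emod_of_pos h2]; omega
      simp only [hs, beq_self_eq_true, if_true, ih (s+1), hs1]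
      simp [splitAlt, List.append_assoc]
    · have hs : PySem.Int.mod s 2 = 1 := by rw [PySem.Int.mod_eq_emod_of_pos h2]; exact h
      have hs1 : PySem.Int.mod (s+1) 2 = 0 := by rw [PySem.Int.mod_eq_emod_of_pos h2]; omega
      simp only [hs, ih (s+1), hs1]
      simp [splitAlt, List.append_assoc]

-- both programs compute H ++ (splitAlt O).1 ++ (H ++ (splitAlt O).2).reverse
lemma a_closed (inst : List Int) :
    simple_1d_common_centroid_pattern inst
    = (let K := PySem.List.pyRange 0 (inst.length) 1
       let v := fun j => PySem.List.pyGetD inst j 0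
       let H := K.flatMap (fun j =>
         List.replicate (PySem.Int.floordiv (if PySem.Int.mod (v j) 2 != 0 then v j - 1 else v j) 2).toNat j)
       let O := K.filter (fun j => PySem.Int.mod (v j) 2 != 0)
       H ++ (splitAlt O).1 ++ (H ++ (splitAlt O).2).reverse) := by
  simp only [simple_1d_common_centroid_pattern]
  set C := (PySem.List.enumerate inst 0).foldl (fun d p => d.insert p.1 p.2)
      (PySem.Dict.empty : PySem.Dict Int Int) with hC
  have hCitems : C.items = PySem.List.enumerate inst 0 := by
    have h := PySem.Dict.items_foldl_insert_fresh (PySem.List.enumerate inst 0)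
      (fun p => p.1) (fun p => p.2) (PySem.Dict.empty : PySem.Dict Int Int)
      (fun a _ => PySem.Dict.contains_empty _)
      (by rw [PySem.List.map_fst_enumerate]; exact PySem.List.nodup_pyRange_one _ _)
    simpa using h
  have hCkeys : C.keys = PySem.List.pyRange 0 (inst.length : Int) 1 := by
    simp only [PySem.Dict.keys, hCitems, PySem.List.map_fst_enumerate, zero_add]
  have hCnodup : C.keys.Nodup := by
    rw [hCkeys]; exact PySem.List.nodup_pyRange_one _ _
  have hCget : ∀ j ∈ PySem.List.pyRange 0 (inst.length : Int) 1,
      C.getD j 0 = PySem.List.pyGetD inst j 0 := by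
    intro j hj
    apply PySem.Dict.getD_of_mem_items _ _ hCnodup
    rw [hCitems, PySem.List.enumerate_eq_map_pyRange inst 0]
    simp only [PySem.List.len_eq]
    exact List.mem_map_of_mem hj
  obtain ⟨h1, h2, h3⟩ := oddfix C.keys C PySem.Dict.empty hCnodup
    (fun i _ => PySem.Dict.contains_empty i)
    (fun i hi => (PySem.Dict.contains_iff_mem_keys _ _).mpr hi)
  set CO := C.keys.foldl
      (fun (co : PySem.Dict Int Int × PySem.Dict Int Int) i =>
        if PySem.Int.mod (co.1.getD i 0) 2 != 0 then
          (co.1.modify i 0 (· - 1), co.2.insert i 1)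
        else co)
      (C, PySem.Dict.empty) with hCO
  have hmodC : ∀ a : Int, PySem.Int.mod a 2 = a % 2 :=
    fun a => PySem.Int.mod_eq_emod_of_pos (by norm_num)
  -- the adjusted counts are even
  have hdvd : ∀ i ∈ C.keys, (2:Int) ∣ CO.1.getD i 0 := by
    intro i hi
    rw [h1 i]
    by_cases hm : PySem.Int.mod (C.getD i 0) 2 ≠ 0
    · rw [if_pos ⟨hi, hm⟩]
      rw [hmodC] at hm
      omega
    · rw [if_neg (fun h => hm h.2)]
      have h0 : C.getD i 0 % 2 = 0 := by rw [← hmodC]; exact not_ne_iff.mp hm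
      omega
  rw [evenloop (fun i => CO.1.getD i 0) CO.1.keys (by rw [h2]; exact hdvd) [] []]
  simp only [List.nil_append]
  -- turn the flat halved list into H
  have hflat : CO.1.keys.flatMap
        (fun i => List.replicate (PySem.Int.floordiv (CO.1.getD i 0) 2).toNat i)
      = (PySem.List.pyRange 0 (inst.length : Int) 1).flatMap
        (fun j => List.replicate (PySem.Int.floordiv
          (if PySem.Int.mod (PySem.List.pyGetD inst j 0) 2 != 0 then
            PySem.List.pyGetD inst j 0 - 1 else PySem.List.pyGetD inst j 0) 2).toNat j) := by
    rw [h2, hCkeys]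
    apply List.flatMap_congr
    intro i hi
    have hik : i ∈ C.keys := by rw [hCkeys]; exact hi
    rw [h1 i, hCget i hi]
    by_cases hm : PySem.Int.mod (PySem.List.pyGetD inst i 0) 2 ≠ 0
    · rw [if_pos ⟨hik, hm⟩, if_pos (bne_iff_ne.mpr hm)]
    · rw [if_neg (fun h => hm h.2),
        if_neg (by rw [not_ne_iff.mp hm]; decide)]
  rw [hflat]
  -- the odd dict: keys are O, every stored count is 1
  have hfilter : C.keys.filter (fun i => PySem.Int.mod (C.getD i 0) 2 != 0)
      = (PySem.List.pyRange 0 (inst.length : Int) 1).filter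
        (fun j => PySem.Int.mod (PySem.List.pyGetD inst j 0) 2 != 0) := by
    rw [hCkeys]
    apply List.filter_congr
    intro i hi
    rw [hCget i hi]
  have hemp : (PySem.Dict.empty : PySem.Dict Int Int).items = [] := rfl
  rw [hemp, List.nil_append] at h3
  have hOkeys : CO.2.keys
      = (PySem.List.pyRange 0 (inst.length : Int) 1).filter
        (fun j => PySem.Int.mod (PySem.List.pyGetD inst j 0) 2 != 0) := by
    have hk : CO.2.keys = CO.2.items.map (fun p => p.1) := rfl
    rw [hk, h3, List.map_map, hfilter]
    simp [Function.comp_def]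
  have hOnodup : CO.2.keys.Nodup := by
    rw [hOkeys]
    exact (PySem.List.nodup_pyRange_one _ _).filter _
  have hOget : ∀ i ∈ CO.2.keys, CO.2.getD i 0 = 1 := by
    intro i hi
    apply PySem.Dict.getD_of_mem_items _ _ hOnodup
    rw [h3, hfilter]
    rw [hOkeys] at hi
    exact List.mem_map_of_mem hi
  rw [oneloop (fun i => CO.2.getD i 0) CO.2.keys hOget]
  rw [hOkeys]
  have ht := togfold ((PySem.List.pyRange 0 (inst.length : Int) 1).filter
      (fun j => PySem.Int.mod (PySem.List.pyGetD inst j 0) 2 != 0))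
    ((PySem.List.pyRange 0 (inst.length : Int) 1).flatMap
        (fun j => List.replicate (PySem.Int.floordiv
          (if PySem.Int.mod (PySem.List.pyGetD inst j 0) 2 != 0 then
            PySem.List.pyGetD inst j 0 - 1 else PySem.List.pyGetD inst j 0) 2).toNat j))
    ((PySem.List.pyRange 0 (inst.length : Int) 1).flatMap
        (fun j => List.replicate (PySem.Int.floordiv
          (if PySem.Int.mod (PySem.List.pyGetD inst j 0) 2 != 0 then
            PySem.List.pyGetD inst j 0 - 1 else PySem.List.pyGetD inst j 0) 2).toNat j))
    "left"
  rw [if_pos (by decide)] at ht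
  have ht1 := congrArg Prod.fst ht
  have ht2 := congrArg Prod.snd ht
  dsimp only at ht1 ht2
  rw [ht1, ht2]

lemma b_closed (inst : List Int) :
    simple_1d_common_centroid_pattern_alt inst
    = (let K := PySem.List.pyRange 0 (inst.length) 1
       let v := fun j => PySem.List.pyGetD inst j 0
       let H := K.flatMap (fun j =>
         List.replicate (PySem.Int.floordiv (if PySem.Int.mod (v j) 2 != 0 then v j - 1 else v j) 2).toNat j)
       let O := K.filter (fun j => PySem.Int.mod (v j) 2 != 0)
       H ++ (splitAlt O).1 ++ (H ++ (splitAlt O).2).reverse) := by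
  simp only [simple_1d_common_centroid_pattern_alt]
  rw [PySem.List.foldl_prod_mk
    (fun (h : List Int) (ic : Int × Int) =>
      h ++ PySem.List.pyRepeat [ic.1]
        (PySem.Int.floordiv (if PySem.Int.mod ic.2 2 != 0 then ic.2 - 1 else ic.2) 2))
    (fun (od : List Int) (ic : Int × Int) =>
      if PySem.Int.mod ic.2 2 != 0 then od ++ [ic.1] else od)]
  rw [PySem.List.foldl_append_eq_flatMap, PySem.List.foldl_append_if]
  simp only [List.nil_append]
  rw [PySem.List.enumerate_eq_map_pyRange inst 0]
  rw [List.flatMap_map, List.filter_map]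
  simp only [List.map_map, Function.comp_def, PySem.List.pyRepeat_singleton,
    PySem.List.len_eq, List.map_id']
  rw [oddsplitB]
  have h0 : (PySem.Int.mod 0 2 == 0) = true := by decide
  simp only [h0, if_true]

-- ===== VERDICT (by name: the statement is the Claim_ definition above) =====
theorem simple_1d_common_centroid_pattern_spec : Claim_equal_simple_1d_common_centroid_pattern := by
  intro inst _
  unfold Spec_simple_1d_common_centroid_pattern
  rw [a_closed, b_closed]
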